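-- pv_equiv track=rewrite | github.com/SpinQTech/SpinQit | spinqit/algorithm/chemistry.py | generalized_pair_doubles
-- ===== SOURCE A (Python) =====
-- def generalized_pair_doubles(qubits):
--     pair_gen_doubles_list = []
--
--     qubits_list = list(range(qubits))
--     for r in range(0, qubits - 1, 2):
--         for p in range(0, qubits - 1, 2):
--             if p != r:
--                 pair_gen_doubles_list.append([qubits_list[r: r + 2], qubits_list[p: p + 2]])
--
--     return pair_gen_doubles_list
-- ===== SOURCE B (Python) =====
-- def generalized_pair_doubles(qubits):
--     # single flat pass: decode each pair index t with divmod, branch-free diagonal skip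
--     m = qubits // 2
--     if m < 2:
--         return []
--     res = []
--     for t in range(m * (m - 1)):
--         i, j = divmod(t, m - 1)
--         if j >= i:
--             j += 1
--         res.append([[2 * i, 2 * i + 1], [2 * j, 2 * j + 1]])
--     return res
-- ===== Notes on version B (the rewrite author's own statement) =====
-- stated objective: alternative
-- what changed: B replaces A's nested loops with slicing and a diagonal-filtering if by a single flat loop over a closed-form pair count m*(m-1), decoding each flat index into the two block indices with divmod and a branch-free diagonal skip.
import Mathlib
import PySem

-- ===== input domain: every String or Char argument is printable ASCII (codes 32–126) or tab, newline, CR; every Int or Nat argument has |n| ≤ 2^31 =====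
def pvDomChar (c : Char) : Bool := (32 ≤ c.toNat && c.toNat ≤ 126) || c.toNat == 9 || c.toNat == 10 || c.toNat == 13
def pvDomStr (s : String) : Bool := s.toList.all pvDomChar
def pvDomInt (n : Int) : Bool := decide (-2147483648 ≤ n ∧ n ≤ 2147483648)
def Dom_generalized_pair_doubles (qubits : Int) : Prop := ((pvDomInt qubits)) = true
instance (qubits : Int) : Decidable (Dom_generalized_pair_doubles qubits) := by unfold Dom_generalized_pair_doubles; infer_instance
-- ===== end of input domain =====

-- B replaces A's nested index loops with slicing and a diagonal-filter branch by a single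
-- flat loop over the closed-form pair count m*(m-1), decoding each flat index with divmod
-- (objective: alternative).

-- ===== PORT A =====
def generalized_pair_doubles (qubits : Int) : List (List (List Int)) :=
  let qubits_list := PySem.List.pyRange 0 qubits 1
  (PySem.List.pyRange 0 (qubits - 1) 2).foldl (fun acc r =>
    (PySem.List.pyRange 0 (qubits - 1) 2).foldl (fun acc p =>
      if p ≠ r then
        acc ++ [[PySem.List.slice qubits_list (some r) (some (r + 2)),
                 PySem.List.slice qubits_list (some p) (some (p + 2))]]
      else acc) acc) []

-- ===== PORT B =====
def generalized_pair_doubles_alt (qubits : Int) : List (List (List Int)) :=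
  let m := PySem.Int.floordiv qubits 2
  if m < 2 then []
  else
    (PySem.List.pyRange 0 (m * (m - 1)) 1).foldl (fun res t =>
      let i := PySem.Int.floordiv t (m - 1)
      let j0 := PySem.Int.mod t (m - 1)
      let j := if j0 ≥ i then j0 + 1 else j0
      res ++ [[[2 * i, 2 * i + 1], [2 * j, 2 * j + 1]]]) []

-- ===== PRECONDITION & SPEC =====
def Spec_generalized_pair_doubles (qubits : Int) (out : List (List (List Int))) : Prop := out = generalized_pair_doubles_alt qubits
instance (qubits : Int) (out : List (List (List Int))) : Decidable (Spec_generalized_pair_doubles qubits out) := by unfold Spec_generalized_pair_doubles; infer_instance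

-- ===== CLAIM (what is proved, stated in full; the proofs are below) =====
def Claim_equal_generalized_pair_doubles : Prop := ∀ (qubits : Int), Dom_generalized_pair_doubles qubits → Spec_generalized_pair_doubles qubits (generalized_pair_doubles qubits)

-- ===== LEMMAS AND PROOFS =====

-- the common canonical form: ordered pairs of distinct blocks [2k, 2k+1], k < M
def pvBlk (k : Nat) : List Int := [2 * (k : Int), 2 * (k : Int) + 1]

def pvCanon (M : Nat) : List (List (List Int)) :=
  (List.range M).flatMap (fun a =>
    ((List.range M).filter (fun b => decide (b ≠ a))).map (fun b => [pvBlk a, pvBlk b]))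

-- the slice qubits_list[r : r+2] is the block [r, r+1] when it fits
lemma pv_slice_block (q r : Int) (h0 : 0 ≤ r) (h2 : r + 2 ≤ q) :
    PySem.List.slice (PySem.List.pyRange 0 q 1) (some r) (some (r + 2)) = [r, r + 1] := by
  rw [PySem.List.slice_toNat _ h0 (by omega)]
  rw [PySem.List.pyRange_one_append 0 r q h0 (by omega)]
  rw [show PySem.List.pyRange r q 1 = r :: (r + 1) :: PySem.List.pyRange (r + 1 + 1) q 1 by
    rw [PySem.List.pyRange_one_cons (by omega : r < q), PySem.List.pyRange_one_cons (by omega : r + 1 < q)]]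
  rw [List.drop_append_of_le_length (by rw [PySem.List.length_pyRange_one]; omega)]
  rw [show List.drop r.toNat (PySem.List.pyRange 0 r 1) = [] by
    apply List.drop_eq_nil_of_le; rw [PySem.List.length_pyRange_one]; omega]
  rw [List.nil_append, show (r + 2).toNat - r.toNat = 2 by omega]
  simp

-- every index of the step-2 range leaves room for a full block: 2k + 2 ≤ q
lemma pv_lt_M (q : Int) (k : Nat) (hk : k < (PySem.Int.floordiv q 2).toNat) :
    2 * (k : Int) + 2 ≤ q := by
  rw [PySem.Int.floordiv_eq_ediv_of_pos (by omega)] at hk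
  omega

-- the two ranges have the same length:  len(range(0, q-1, 2)) = (q // 2).toNat
lemma pv_count_eq (q : Int) :
    (if (0 : Int) < q - 1 then ((q - 1 - 0 + 2 - 1) / 2).toNat else 0) =
      (PySem.Int.floordiv q 2).toNat := by
  rw [PySem.Int.floordiv_eq_ediv_of_pos (by omega)]
  split_ifs with h <;> omega

-- A computes the canonical form
lemma pv_A_eq_canon (q : Int) :
    generalized_pair_doubles q = pvCanon (PySem.Int.floordiv q 2).toNat := by
  unfold generalized_pair_doubles
  rw [PySem.List.pyRange_of_pos 0 (q - 1) (by omega : (0:Int) < 2)]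
  rw [pv_count_eq q]
  set M := (PySem.Int.floordiv q 2).toNat with hM
  simp only [PySem.List.foldl_append_ite]
  simp only [PySem.List.foldl_append_eq_flatMap]
  rw [List.nil_append, List.flatMap_map]
  unfold pvCanon
  apply List.flatMap_congr
  intro a ha
  simp only [List.mem_range] at ha
  rw [List.filter_map, List.map_map]
  have hfil : List.filter ((fun p : Int => decide ¬ p = 0 + 2 * (a : Int)) ∘ (fun k : Nat => 0 + 2 * (k : Int))) (List.range M) =
      List.filter (fun b => decide (b ≠ a)) (List.range M) := by
    apply List.filter_congr
    intro b _
    simp only [Function.comp_apply, decide_eq_decide, zero_add, ne_eq]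
    constructor <;> intro h <;> omega
  rw [hfil]
  apply List.map_congr_left
  intro b hb
  have hbM : b < M := List.mem_range.1 (List.mem_of_mem_filter hb)
  simp only [Function.comp_apply, zero_add]
  rw [pv_slice_block q (2 * (a : Int)) (by positivity) (pv_lt_M q a ha)]
  rw [pv_slice_block q (2 * (b : Int)) (by positivity) (pv_lt_M q b hbM)]
  rfl

-- flat range of length a*b, decoded by div/mod, equals the nested enumeration
lemma pv_range_mul_decode {γ : Type} (a b : Nat) (g : Nat → Nat → γ) :
    (List.range (a * b)).map (fun t => g (t / b) (t % b)) =
      (List.range a).flatMap (fun i => (List.range b).map (g i)) := by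
  induction a with
  | zero => simp
  | succ a ih =>
    rw [Nat.succ_mul, List.range_add, List.map_append, ih, List.range_succ, List.flatMap_append]
    congr 1
    simp only [List.map_map, List.flatMap_cons, List.flatMap_nil, List.append_nil]
    apply List.map_congr_left
    intro j hj
    simp only [List.mem_range] at hj
    simp only [Function.comp_apply]
    have hb : 0 < b := by omega
    have h1 : (a * b + j) / b = a := by
      rw [Nat.add_comm, Nat.add_mul_div_right _ _ hb, Nat.div_eq_of_lt hj, Nat.zero_add]
    have h2 : (a * b + j) % b = j := by
      rw [Nat.add_comm, Nat.add_mul_mod_self_right, Nat.mod_eq_of_lt hj]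
    rw [h1, h2]

-- skipping the diagonal by filtering equals skipping it by index arithmetic
lemma pv_skip_diag {γ : Type} (M a : Nat) (ha : a < M) (g : Nat → γ) :
    ((List.range M).filter (fun b => decide (b ≠ a))).map g =
      (List.range (M - 1)).map (fun b => g (b + if a ≤ b then 1 else 0)) := by
  obtain ⟨K, rfl⟩ : ∃ K, M = a + 1 + K := ⟨M - a - 1, by omega⟩
  rw [show List.range (a + 1 + K) = List.range a ++ [a] ++ (List.range K).map (fun x => a + 1 + x) by
    rw [List.range_add, List.range_add, List.range_succ]; simp]
  rw [show a + 1 + K - 1 = a + K by omega]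
  rw [show List.range (a + K) = List.range a ++ (List.range K).map (fun x => a + x) from List.range_add]
  rw [List.filter_append, List.filter_append, List.filter_map]
  rw [show (List.range a).filter (fun b => decide (b ≠ a)) = List.range a by
    apply List.filter_eq_self.2; intro b hb; simp only [List.mem_range] at hb; simp; omega]
  rw [show ([a].filter (fun b => decide (b ≠ a))) = [] by simp]
  rw [show (List.range K).filter ((fun b => decide (b ≠ a)) ∘ (fun x => a + 1 + x)) = List.range K by
    apply List.filter_eq_self.2; intro b _; simp only [Function.comp_apply, decide_eq_true_eq]; omega]
  simp only [List.map_append, List.map_map, List.append_nil]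
  congr 1
  · apply List.map_congr_left
    intro b hb
    simp only [List.mem_range] at hb
    have hnb : ¬ a ≤ b := by omega
    simp [hnb]
  · apply List.map_congr_left
    intro c _
    have hb : a ≤ a + c := by omega
    simp only [Function.comp_apply, hb, if_pos]
    congr 1
    omega

-- B computes the canonical form
lemma pv_B_eq_canon (q : Int) :
    generalized_pair_doubles_alt q = pvCanon (PySem.Int.floordiv q 2).toNat := by
  simp only [generalized_pair_doubles_alt]
  set m := PySem.Int.floordiv q 2 with hm
  by_cases hlt : m < 2
  · rw [if_pos hlt]
    have : m.toNat = 0 ∨ m.toNat = 1 := by omega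
    rcases this with h | h <;> rw [h] <;> simp [pvCanon, List.range_succ]
  · rw [if_neg hlt]
    have hm2 : 2 ≤ m := by omega
    set M := m.toNat with hM
    set d := M - 1 with hd
    have hmM : m = (M : Int) := by omega
    have hdm : m - 1 = (d : Int) := by omega
    have hMd : M * d = (m * (m - 1)).toNat := by
      rw [hdm, hmM, ← Nat.cast_mul, Int.toNat_natCast]
    simp only [PySem.List.foldl_append_eq_flatMap]
    rw [List.nil_append]
    rw [PySem.List.pyRange_one]
    rw [show (m * (m - 1) - 0).toNat = M * d by rw [Int.sub_zero]; exact hMd.symm]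
    simp only [zero_add, List.flatMap_map]
    have hstep : ∀ t : Nat, t < M * d →
        ([[[2 * PySem.Int.floordiv (t : Int) (m - 1), 2 * PySem.Int.floordiv (t : Int) (m - 1) + 1],
           [2 * (if PySem.Int.mod (t : Int) (m - 1) ≥ PySem.Int.floordiv (t : Int) (m - 1) then PySem.Int.mod (t : Int) (m - 1) + 1 else PySem.Int.mod (t : Int) (m - 1)),
            2 * (if PySem.Int.mod (t : Int) (m - 1) ≥ PySem.Int.floordiv (t : Int) (m - 1) then PySem.Int.mod (t : Int) (m - 1) + 1 else PySem.Int.mod (t : Int) (m - 1)) + 1]]] : List (List (List Int))) =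
        [[pvBlk (t / d), pvBlk (t % d + if t / d ≤ t % d then 1 else 0)]] := by
      intro t ht
      have hdpos : (0 : Int) < m - 1 := by omega
      have hmd : m - 1 = (d : Int) := by omega
      have hfd : PySem.Int.floordiv (t : Int) (m - 1) = ((t / d : Nat) : Int) := by
        rw [hmd]; exact_mod_cast PySem.Int.floordiv_natCast t d
      have hmod : PySem.Int.mod (t : Int) (m - 1) = ((t % d : Nat) : Int) := by
        rw [hmd]; exact_mod_cast PySem.Int.mod_natCast t d
      rw [hfd, hmod]
      have hiff : ((t % d : Nat) : Int) ≥ ((t / d : Nat) : Int) ↔ t / d ≤ t % d := by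
        constructor <;> intro h <;> exact_mod_cast h
      by_cases hc : t / d ≤ t % d
      · rw [if_pos (hiff.2 hc), if_pos hc]
        simp only [pvBlk]; push_cast; ring_nf
      · rw [if_neg (fun h => hc (hiff.1 h)), if_neg hc]
        simp only [pvBlk]; push_cast; ring_nf
    calc (List.range (M * d)).flatMap (fun t : Nat =>
            ([[[2 * PySem.Int.floordiv ((t : Int)) (m - 1), 2 * PySem.Int.floordiv ((t : Int)) (m - 1) + 1],
               [2 * (if PySem.Int.mod ((t : Int)) (m - 1) ≥ PySem.Int.floordiv ((t : Int)) (m - 1) then PySem.Int.mod ((t : Int)) (m - 1) + 1 else PySem.Int.mod ((t : Int)) (m - 1)),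
                2 * (if PySem.Int.mod ((t : Int)) (m - 1) ≥ PySem.Int.floordiv ((t : Int)) (m - 1) then PySem.Int.mod ((t : Int)) (m - 1) + 1 else PySem.Int.mod ((t : Int)) (m - 1)) + 1]]] : List (List (List Int))))
        = (List.range (M * d)).flatMap (fun t => [[pvBlk (t / d), pvBlk (t % d + if t / d ≤ t % d then 1 else 0)]]) := by
          apply List.flatMap_congr; intro t ht; exact hstep t (List.mem_range.1 ht)
      _ = (List.range (M * d)).map (fun t => [pvBlk (t / d), pvBlk (t % d + if t / d ≤ t % d then 1 else 0)]) := by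
          rw [← List.map_eq_flatMap]
      _ = (List.range M).flatMap (fun i => (List.range d).map (fun j => [pvBlk i, pvBlk (j + if i ≤ j then 1 else 0)])) := by
          exact pv_range_mul_decode M d (fun i j => [pvBlk i, pvBlk (j + if i ≤ j then 1 else 0)])
      _ = pvCanon M := by
          unfold pvCanon
          apply List.flatMap_congr
          intro a ha
          rw [pv_skip_diag M a (List.mem_range.1 ha) (fun b => [pvBlk a, pvBlk b])]

-- ===== VERDICT (by name: the statement is the Claim_ definition above) =====
theorem generalized_pair_doubles_spec : Claim_equal_generalized_pair_doubles := by
  intro q _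
  unfold Spec_generalized_pair_doubles
  rw [pv_A_eq_canon q, pv_B_eq_canon q]
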